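-- pv_equiv track=rewrite | github.com/zhaolijian/suanfa | jingdong/JD10.py | func
-- ===== SOURCE A (Python) =====
-- def func(s):
--     length = len(s)
--     if length <= 1:
--         return s
--     i = length - 1
--     number = 0
--     while i > 0:
--         if s[i:] == s[:length - i]:
--             number = max(number, length - i)
--         i -= 1
--     return s + s[number:]
-- ===== SOURCE B (Python) =====
-- def func(s):
--     n = len(s)
--     if n <= 1:
--         return s
--     # KMP prefix function: pi[i] = length of longest proper border of s[:i+1]
--     pi = [0] * n
--     k = 0
--     for i in range(1, n):
--         while k > 0 and s[i] != s[k]: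
--             k = pi[k - 1]
--         if s[i] == s[k]:
--             k += 1
--         pi[i] = k
--     return s + s[pi[-1]:]
-- ===== Notes on version B (the rewrite author's own statement) =====
-- stated objective: faster
-- what changed: replaces the quadratic scan comparing every suffix s[i:] with the prefix s[:n-i] by the KMP prefix-function, which finds the longest proper border in one linear pass
import Mathlib
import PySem

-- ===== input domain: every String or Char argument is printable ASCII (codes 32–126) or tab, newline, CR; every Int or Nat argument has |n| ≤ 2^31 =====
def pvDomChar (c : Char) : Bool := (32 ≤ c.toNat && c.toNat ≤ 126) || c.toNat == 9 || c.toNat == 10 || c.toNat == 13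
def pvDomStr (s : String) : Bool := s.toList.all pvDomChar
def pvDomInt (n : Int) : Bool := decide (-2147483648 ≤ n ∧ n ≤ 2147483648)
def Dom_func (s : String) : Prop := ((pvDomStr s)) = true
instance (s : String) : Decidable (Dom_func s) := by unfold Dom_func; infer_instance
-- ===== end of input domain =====

-- B replaces A's quadratic all-suffixes scan by the linear KMP prefix-function (objective: faster, asymptotic).

-- ===== PORT A =====
-- while i > 0: if s[i:] == s[:length-i]: number = max(number, length-i); i -= 1
def funcLoopA (s : String) (len : Int) (i : Int) (number : Int) : Int :=
  if _h : 0 < i then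
    funcLoopA s len (i - 1)
      (if PySem.Str.slice s (some i) none = PySem.Str.slice s none (some (len - i)) then
        max number (len - i) else number)
  else number
termination_by i.toNat
decreasing_by simp; omega

def func (s : String) : String :=
  let length : Int := PySem.Str.len s
  if length ≤ 1 then s
  else
    let number := funcLoopA s length (length - 1) 0
    -- s + s[number:]  (string concatenation written on the code-point lists)
    String.ofList (s.toList ++ (PySem.Str.slice s (some number) none).toList)

-- ===== PORT B =====
-- inner 'while k > 0 and s[i] != s[k]: k = pi[k-1]'; fuel = initial k (each jump strictly
-- decreases k because pi[j] ≤ j, so the fuel is never exhausted before the guard fails)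
def kmpFall (l : List Char) (pi : List Nat) (c : Char) : Nat → Nat → Nat
  | k, 0 => k
  | k, fuel + 1 =>
    if 0 < k ∧ l.getD k ' ' ≠ c then kmpFall l pi c (pi.getD (k - 1) 0) fuel else k

-- for i in range(1, n): …; pi[i] = k   (s[i] is in range, so List.getD is exact here)
def kmpLoop (l : List Char) (n i : Nat) (pi : List Nat) (k : Nat) : List Nat :=
  if _h : i < n then
    let k1 := kmpFall l pi (l.getD i ' ') k k
    let k2 := if l.getD i ' ' = l.getD k1 ' ' then k1 + 1 else k1
    kmpLoop l n (i + 1) (pi.set i k2) k2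
  else pi
termination_by n - i

def func_alt (s : String) : String :=
  let l := s.toList
  let n := l.length
  if n ≤ 1 then s
  else
    let pi := kmpLoop l n 1 (List.replicate n 0) 0
    -- s + s[pi[-1]:]
    String.ofList (l ++ l.drop (pi.getD (n - 1) 0))

-- ===== PRECONDITION & SPEC =====
def Spec_func (s : String) (out : String) : Prop := out = func_alt s
instance (s : String) (out : String) : Decidable (Spec_func s out) := by unfold Spec_func; infer_instance

-- ===== CLAIM (what is proved, stated in full; the proofs are below) =====
def Claim_equal_func : Prop := ∀ (s : String), Dom_func s → Spec_func s (func s)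

-- ===== LEMMAS AND PROOFS =====

-- k is a (proper) border length of l: the prefix and the suffix of length k coincide
def brdB (l : List Char) (k : Nat) : Bool :=
  decide (k < l.length) && decide (l.take k = l.drop (l.length - k))

-- length of the longest proper border of l
def maxB (l : List Char) : Nat :=
  Nat.findGreatest (fun k => brdB l k = true) (l.length - 1)

-- pure Nat version of A's loop (counter i runs down; the tested border length is l.length - i)
def loopN (l : List Char) : Nat → Nat → Nat
  | 0, num => num
  | i + 1, num =>
    loopN l i (if brdB l (l.length - (i + 1)) = true then max num (l.length - (i + 1)) else num)

-- restriction of the border predicate to lengths ≥ l.length - i (the part A's loop has seen)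
def gB (l : List Char) (i k : Nat) : Bool := decide (l.length - i ≤ k) && brdB l k

-- ===== basic facts about borders =====
lemma brdB_iff {l : List Char} {k : Nat} :
    brdB l k = true ↔ k < l.length ∧ l.take k = l.drop (l.length - k) := by
  simp [brdB]

lemma brdB_lt {l : List Char} {k : Nat} (h : brdB l k = true) : k < l.length :=
  (brdB_iff.mp h).1

lemma brdB_zero {l : List Char} (h : l ≠ []) : brdB l 0 = true := by
  rw [brdB_iff]
  exact ⟨List.length_pos_iff.mpr h, by simp⟩

lemma maxB_le (l : List Char) : maxB l ≤ l.length - 1 := by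
  unfold maxB; exact Nat.findGreatest_le _

lemma brdB_maxB {l : List Char} (h : l ≠ []) : brdB l (maxB l) = true := by
  unfold maxB
  exact Nat.findGreatest_spec (P := fun k => brdB l k = true) (Nat.zero_le _) (brdB_zero h)

lemma le_maxB {l : List Char} {k : Nat} (h : brdB l k = true) : k ≤ maxB l := by
  unfold maxB; exact Nat.le_findGreatest (by have := brdB_lt h; omega) h

lemma getD_take {l : List Char} {i k : Nat} (d : Char) (h : k < i) :
    (l.take i).getD k d = l.getD k d := by
  simp [List.getD_eq_getElem?_getD, h]

-- extension: borders of t ++ [c] of positive length are borders of t followed by a matching c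
lemma brdB_append {t : List Char} {c : Char} {k : Nat} :
    brdB (t ++ [c]) (k + 1) = true ↔ brdB t k = true ∧ t.getD k ' ' = c := by
  rw [brdB_iff, brdB_iff]
  constructor
  · rintro ⟨hk, he⟩
    rw [List.length_append, List.length_cons, List.length_nil] at hk
    have hk' : k < t.length := by omega
    rw [List.take_append_of_le_length (by omega),
        show (t ++ [c]).length - (k + 1) = t.length - k by simp only [List.length_append, List.length_cons, List.length_nil]; omega,
        List.drop_append_of_le_length (by omega), List.take_add_one,
        List.getElem?_eq_getElem hk'] at he
    simp only [Option.toList_some] at he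
    obtain ⟨h1, h2⟩ := List.append_inj he (by simp [List.length_take, List.length_drop]; omega)
    refine ⟨⟨hk', h1⟩, ?_⟩
    rw [List.getD_eq_getElem t ' ' hk']
    simpa using h2
  · rintro ⟨⟨hk, he⟩, hc⟩
    refine ⟨by simp; omega, ?_⟩
    rw [List.take_append_of_le_length (by omega),
        show (t ++ [c]).length - (k + 1) = t.length - k by simp only [List.length_append, List.length_cons, List.length_nil]; omega,
        List.drop_append_of_le_length (by omega), List.take_add_one,
        List.getElem?_eq_getElem hk]
    simp only [Option.toList_some]
    rw [he]
    congr 1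
    rw [List.getD_eq_getElem t ' ' hk] at hc
    simp [hc]

-- a smaller border of t is a border of the prefix cut at a larger border
lemma brdB_down {t : List Char} {a b : Nat} (hb : brdB t b = true) (ha : brdB t a = true)
    (hab : a < b) : brdB (t.take b) a = true := by
  obtain ⟨hbl, hbe⟩ := brdB_iff.mp hb
  obtain ⟨hal, hae⟩ := brdB_iff.mp ha
  rw [brdB_iff]
  have hlen : (t.take b).length = b := List.length_take_of_le (by omega)
  refine ⟨by omega, ?_⟩
  rw [hlen, List.take_take, min_eq_left (by omega), hbe, List.drop_drop, hae]
  congr 1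
  omega

-- a border of the prefix cut at a border of t is itself a border of t
lemma brdB_up {t : List Char} {a b : Nat} (hb : brdB t b = true)
    (ha : brdB (t.take b) a = true) : brdB t a = true := by
  obtain ⟨hbl, hbe⟩ := brdB_iff.mp hb
  obtain ⟨hal, hae⟩ := brdB_iff.mp ha
  have hlen : (t.take b).length = b := List.length_take_of_le (by omega)
  rw [hlen] at hal hae
  rw [brdB_iff]
  refine ⟨by omega, ?_⟩
  have h1 : t.take a = (t.take b).take a := by
    rw [List.take_take, min_eq_left (by omega)]
  rw [h1, hae, hbe, List.drop_drop]
  congr 1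
  omega

-- ===== B side: the KMP loops compute maxB =====
lemma kmpFall_spec (l : List Char) (pi : List Nat) (c : Char) (i : Nat)
    (hi : i ≤ l.length)
    (hpi : ∀ j, j < i → pi.getD j 0 = maxB (l.take (j + 1))) :
    ∀ fuel k, k ≤ fuel → k < i → brdB (l.take i) k = true →
      (∀ b, brdB (l.take i) b = true → l.getD b ' ' = c → b ≤ k) →
      kmpFall l pi c k fuel ≤ k ∧
      brdB (l.take i) (kmpFall l pi c k fuel) = true ∧
      (kmpFall l pi c k fuel = 0 ∨ l.getD (kmpFall l pi c k fuel) ' ' = c) ∧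
      (∀ b, brdB (l.take i) b = true → l.getD b ' ' = c → b ≤ kmpFall l pi c k fuel) := by
  intro fuel
  induction fuel with
  | zero =>
    intro k hk _ hbrd hmax
    have hk0 : k = 0 := by omega
    subst hk0
    exact ⟨le_refl _, hbrd, Or.inl rfl, hmax⟩
  | succ fuel ih =>
    intro k hk hki hbrd hmax
    by_cases hg : 0 < k ∧ l.getD k ' ' ≠ c
    · rw [kmpFall, if_pos hg]
      obtain ⟨hk0, hne⟩ := hg
      have hk1i : k - 1 < i := by omega
      have hjump : pi.getD (k - 1) 0 = maxB (l.take k) := by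
        have := hpi (k - 1) hk1i
        rwa [show k - 1 + 1 = k by omega] at this
      set k' := pi.getD (k - 1) 0 with hk'
      have htkne : l.take k ≠ [] := by
        intro h
        have := List.length_take_of_le (le_trans (by omega : k ≤ i) hi)
        rw [h] at this
        simp at this
        omega
      have htklen : (l.take k).length = k := List.length_take_of_le (le_trans (by omega) hi)
      have hk'le : k' ≤ k - 1 := by
        rw [hjump]
        have := maxB_le (l.take k)
        omega
      have hbrd' : brdB ((l.take i).take k) k' = true := by
        rw [List.take_take, min_eq_left (by omega), hjump]
        exact brdB_maxB htkne
      have hbrdk' : brdB (l.take i) k' = true := brdB_up hbrd hbrd'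
      have hmax' : ∀ b, brdB (l.take i) b = true → l.getD b ' ' = c → b ≤ k' := by
        intro b hb hbc
        have hbk : b ≤ k := hmax b hb hbc
        have hbne : b ≠ k := by
          intro h
          rw [h] at hbc
          exact hne hbc
        have hblt : b < k := by omega
        have : brdB ((l.take i).take k) b = true := brdB_down hbrd hb hblt
        rw [List.take_take, min_eq_left (by omega)] at this
        rw [hjump]
        exact le_maxB this
      have := ih k' (by omega) (by omega) hbrdk' hmax'
      exact ⟨le_trans this.1 (by omega), this.2⟩
    · rw [kmpFall, if_neg hg]
      refine ⟨le_refl _, hbrd, ?_, hmax⟩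
      by_cases h0 : k = 0
      · exact Or.inl h0
      · right
        by_contra hne
        exact hg ⟨by omega, hne⟩

lemma kmpStep_spec (l : List Char) (pi : List Nat) (i : Nat)
    (h1 : 1 ≤ i) (h2 : i < l.length)
    (hpi : ∀ j, j < i → pi.getD j 0 = maxB (l.take (j + 1))) :
    (if l.getD i ' ' = l.getD (kmpFall l pi (l.getD i ' ') (maxB (l.take i)) (maxB (l.take i))) ' '
      then kmpFall l pi (l.getD i ' ') (maxB (l.take i)) (maxB (l.take i)) + 1
      else kmpFall l pi (l.getD i ' ') (maxB (l.take i)) (maxB (l.take i)))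
      = maxB (l.take (i + 1)) := by
  set c := l.getD i ' ' with hc
  set k := maxB (l.take i) with hkdef
  have htine : l.take i ≠ [] := by
    intro h
    have := List.length_take_of_le (le_of_lt h2)
    rw [h] at this; simp at this; omega
  have htilen : (l.take i).length = i := List.length_take_of_le (le_of_lt h2)
  have hkles : k ≤ i - 1 := by
    have := maxB_le (l.take i); rw [htilen] at this; exact this
  have hfall := kmpFall_spec l pi c i (le_of_lt h2) hpi k k (le_refl _) (by omega)
      (brdB_maxB htine)
      (fun b hb _ => le_maxB hb)
  set k1 := kmpFall l pi c k k with hk1def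
  obtain ⟨hk1le, hk1brd, hk1or, hk1max⟩ := hfall
  have hk1lt : k1 < i := by omega
  -- take (i+1) l = take i l ++ [l[i]]
  have hsucc : l.take (i + 1) = l.take i ++ [c] := by
    rw [List.take_add_one, List.getElem?_eq_getElem h2]
    simp only [Option.toList_some]
    rw [hc, List.getD_eq_getElem l ' ' h2]
  have htgetD : (l.take i).getD k1 ' ' = l.getD k1 ' ' := getD_take ' ' hk1lt
  have hne' : l.take (i+1) ≠ [] := by rw [hsucc]; simp
  by_cases hcase : c = l.getD k1 ' '
  · rw [if_pos hcase]
    -- k1+1 is a border of take (i+1), and it is maximal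
    have hb1 : brdB (l.take (i + 1)) (k1 + 1) = true := by
      rw [hsucc, brdB_append]
      exact ⟨hk1brd, by rw [htgetD]; exact hcase.symm⟩
    have hub : maxB (l.take (i + 1)) ≤ k1 + 1 := by
      have hm := brdB_maxB hne'
      rcases Nat.eq_zero_or_pos (maxB (l.take (i + 1))) with h0 | hpos
      · omega
      · obtain ⟨m, hm'⟩ := Nat.exists_eq_add_of_lt hpos
        have hmeq : maxB (l.take (i+1)) = m + 1 := by omega
        rw [hmeq, hsucc, brdB_append] at hm
        obtain ⟨hmb, hmc⟩ := hm
        have hmlt : m < i := by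
          have := brdB_lt hmb; rwa [htilen] at this
        have := hk1max m hmb (by rw [← getD_take ' ' hmlt]; exact hmc)
        omega
    have := le_maxB hb1
    omega
  · rw [if_neg hcase]
    -- no border of take i extends with c, so the new maximal border is 0 = k1
    have hk10 : k1 = 0 := by
      rcases hk1or with h | h
      · exact h
      · exact absurd h.symm hcase
    rw [hk10]
    have hm := brdB_maxB hne'
    rcases Nat.eq_zero_or_pos (maxB (l.take (i + 1))) with h0 | hpos
    · omega
    · exfalso
      obtain ⟨m, hm'⟩ := Nat.exists_eq_add_of_lt hpos
      have hmeq : maxB (l.take (i+1)) = m + 1 := by omega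
      rw [hmeq, hsucc, brdB_append] at hm
      obtain ⟨hmb, hmc⟩ := hm
      have hmlt : m < i := by
        have := brdB_lt hmb; rwa [htilen] at this
      have := hk1max m hmb (by rw [← getD_take ' ' hmlt]; exact hmc)
      have hm0 : m = 0 := by omega
      rw [hm0] at hmc
      rw [hk10] at hcase
      rw [getD_take ' ' (by omega : 0 < i)] at hmc
      exact hcase hmc.symm

lemma kmpLoop_spec (l : List Char) : ∀ d i pi k, l.length - i = d → 1 ≤ i → i ≤ l.length →
    pi.length = l.length →
    (∀ j, j < i → pi.getD j 0 = maxB (l.take (j + 1))) → k = maxB (l.take i) →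
    (kmpLoop l l.length i pi k).getD (l.length - 1) 0 = maxB l := by
  intro d
  induction d with
  | zero =>
    intro i pi k hd h1 h2 hlen hpi hk
    have hieq : i = l.length := by omega
    rw [kmpLoop, dif_neg (by omega)]
    have := hpi (l.length - 1) (by omega)
    rw [show l.length - 1 + 1 = l.length by omega, List.take_length] at this
    exact this
  | succ d ih =>
    intro i pi k hd h1 h2 hlen hpi hk
    have hilt : i < l.length := by omega
    rw [kmpLoop, dif_pos hilt]
    have hstep := kmpStep_spec l pi i h1 hilt hpi
    rw [← hk] at hstep
    refine ih (i + 1) _ _ (by omega) (by omega) (by omega) (by simp [hlen]) ?_ ?_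
    · intro j hj
      by_cases hji : j = i
      · subst hji
        rw [List.getD_eq_getElem?_getD, List.getElem?_set_self (by omega),
            Option.getD_some]
        exact hstep
      · rw [List.getD_eq_getElem?_getD, List.getElem?_set_ne (by omega : i ≠ j),
            ← List.getD_eq_getElem?_getD]
        exact hpi j (by omega)
    · exact hstep

-- ===== A side: the quadratic scan computes maxB =====
lemma findGreatest_congr_pos (P Q : Nat → Prop) [DecidablePred P] [DecidablePred Q]
    (h : ∀ k, 0 < k → (P k ↔ Q k)) (b : Nat) :
    Nat.findGreatest P b = Nat.findGreatest Q b := by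
  induction b with
  | zero => rfl
  | succ b ih =>
    rw [Nat.findGreatest_succ, Nat.findGreatest_succ, ih]
    by_cases hp : P (b + 1)
    · rw [if_pos hp, if_pos ((h (b+1) (by omega)).mp hp)]
    · rw [if_neg hp, if_neg (fun hq => hp ((h (b+1) (by omega)).mpr hq))]

lemma loopN_spec (l : List Char) : ∀ i num, i < l.length →
    loopN l i num = max num (Nat.findGreatest (fun k => gB l i k = true) (l.length - 1)) := by
  intro i
  induction i with
  | zero =>
    intro num _
    have h0 : Nat.findGreatest (fun k => gB l 0 k = true) (l.length - 1) = 0 := by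
      rw [Nat.findGreatest_eq_zero_iff]
      intro n hn hn' hgb
      simp only [gB, Bool.and_eq_true, decide_eq_true_eq] at hgb
      omega
    rw [loopN, h0]
    omega
  | succ i ih =>
    intro num hi
    obtain ⟨hgle, hgP, hgmax⟩ := (Nat.findGreatest_eq_iff (P := fun k => gB l i k = true)
        (k := l.length - 1)
        (m := Nat.findGreatest (fun k => gB l i k = true) (l.length - 1))).mp rfl
    rw [loopN]
    by_cases hb : brdB l (l.length - (i + 1)) = true
    · rw [if_pos hb, ih _ (by omega)]
      have hG : Nat.findGreatest (fun k => gB l (i + 1) k = true) (l.length - 1)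
          = max (l.length - (i + 1)) (Nat.findGreatest (fun k => gB l i k = true) (l.length - 1)) := by
        rw [Nat.findGreatest_eq_iff]
        refine ⟨by omega, ?_, ?_⟩
        · intro _
          rcases le_or_gt (Nat.findGreatest (fun k => gB l i k = true) (l.length - 1))
              (l.length - (i + 1)) with hle | hlt
          · rw [max_eq_left hle]
            simp only [gB, Bool.and_eq_true, decide_eq_true_eq]
            exact ⟨by omega, hb⟩
          · rw [max_eq_right (le_of_lt hlt)]
            have h2 := hgP (by omega)
            simp only [gB, Bool.and_eq_true, decide_eq_true_eq] at h2 ⊢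
            exact ⟨by omega, h2.2⟩
        · intro j hj hj' hgb
          simp only [gB, Bool.and_eq_true, decide_eq_true_eq] at hgb
          have hj2 : gB l i j = true := by
            simp only [gB, Bool.and_eq_true, decide_eq_true_eq]
            exact ⟨by omega, hgb.2⟩
          exact hgmax (by omega) hj' hj2
      rw [hG]
      omega
    · rw [if_neg hb, ih _ (by omega)]
      have hG : Nat.findGreatest (fun k => gB l (i + 1) k = true) (l.length - 1)
          = Nat.findGreatest (fun k => gB l i k = true) (l.length - 1) := by
        rw [Nat.findGreatest_eq_iff]
        refine ⟨hgle, ?_, ?_⟩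
        · intro hne
          have := hgP hne
          simp only [gB, Bool.and_eq_true, decide_eq_true_eq] at this ⊢
          exact ⟨by omega, this.2⟩
        · intro j hj hj' hgb
          simp only [gB, Bool.and_eq_true, decide_eq_true_eq] at hgb
          by_cases hjm : j = l.length - (i + 1)
          · exact hb (hjm ▸ hgb.2)
          · have hj2 : gB l i j = true := by
              simp only [gB, Bool.and_eq_true, decide_eq_true_eq]
              exact ⟨by omega, hgb.2⟩
            exact hgmax (by omega) hj' hj2
      rw [hG]

-- A's loop over Int/String slices is the pure loopN
lemma funcLoopA_eq_loopN (s : String) : ∀ i num : Nat, i < s.toList.length →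
    funcLoopA s (s.toList.length : Int) (i : Int) (num : Int) = (loopN s.toList i num : Int) := by
  intro i
  induction i with
  | zero =>
    intro num _
    rw [funcLoopA, loopN, dif_neg (by simp)]
  | succ i ih =>
    intro num hi
    have hm : ((s.toList.length : Int) - ((i + 1 : Nat) : Int)) = ((s.toList.length - (i + 1) : Nat) : Int) := by
      push_cast
      omega
    have hcond : (PySem.Str.slice s (some ((i + 1 : Nat) : Int)) none
        = PySem.Str.slice s none (some ((s.toList.length : Int) - ((i + 1 : Nat) : Int))))
        ↔ brdB s.toList (s.toList.length - (i + 1)) = true := by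
      rw [← String.toList_inj, hm]
      have e1 : (PySem.Str.slice s (some ((i + 1 : Nat) : Int)) none).toList
          = s.toList.drop (i + 1) := by
        simp only [PySem.Str.toList_slice, PySem.Chars.slice_eq_listSlice,
          PySem.List.slice_from_natCast]
      have e2 : (PySem.Str.slice s none (some ((s.toList.length - (i + 1) : Nat) : Int))).toList
          = s.toList.take (s.toList.length - (i + 1)) := by
        simp only [PySem.Str.toList_slice, PySem.Chars.slice_eq_listSlice,
          PySem.List.slice_to_natCast]
      rw [e1, e2, brdB_iff]
      constructor
      · intro h
        refine ⟨by omega, ?_⟩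
        rw [show s.toList.length - (s.toList.length - (i + 1)) = i + 1 by omega]
        exact h.symm
      · intro ⟨_, h⟩
        rw [show s.toList.length - (s.toList.length - (i + 1)) = i + 1 by omega] at h
        exact h.symm
    rw [funcLoopA, loopN, dif_pos (by exact_mod_cast Nat.succ_pos i),
        show ((i + 1 : Nat) : Int) - 1 = ((i : Nat) : Int) by push_cast; ring]
    by_cases hbb : brdB s.toList (s.toList.length - (i + 1)) = true
    · rw [if_pos (hcond.mpr hbb), if_pos hbb, hm,
          show (max (num : Int) ((s.toList.length - (i + 1) : Nat) : Int))
            = ((max num (s.toList.length - (i + 1)) : Nat) : Int) by rw [Nat.cast_max]]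
      exact ih _ (by omega)
    · rw [if_neg (fun h => hbb (hcond.mp h)), if_neg hbb]
      exact ih _ (by omega)

-- the filtered findGreatest at i = n-1 is maxB
lemma gB_final (l : List Char) (h : 2 ≤ l.length) :
    Nat.findGreatest (fun k => gB l (l.length - 1) k = true) (l.length - 1) = maxB l := by
  unfold maxB
  apply findGreatest_congr_pos
  intro k hk
  simp only [gB, Bool.and_eq_true, decide_eq_true_eq]
  constructor
  · exact And.right
  · intro hb
    exact ⟨by omega, hb⟩

-- ===== VERDICT (by name: the statement is the Claim_ definition above) =====
-- the two helper values agree: A's scan and B's prefix-function both compute maxB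
lemma maxB_take_one (l : List Char) (h : 1 ≤ l.length) : maxB (l.take 1) = 0 := by
  unfold maxB
  rw [List.length_take_of_le h]
  exact Nat.findGreatest_zero

theorem func_spec : Claim_equal_func := by
  unfold Claim_equal_func
  intro s _
  unfold Spec_func func func_alt
  have hlen : PySem.Str.len s = (s.toList.length : Int) := by simp
  simp only [hlen]
  by_cases h : s.toList.length ≤ 1
  · rw [if_pos (by exact_mod_cast h), if_pos h]
  · rw [if_neg (by exact_mod_cast h), if_neg h]
    have h2 : 2 ≤ s.toList.length := by omega
    -- A's number is maxB
    have hnum : funcLoopA s (s.toList.length : Int) ((s.toList.length : Int) - 1) 0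
        = ((maxB s.toList : Nat) : Int) := by
      rw [show ((s.toList.length : Int) - 1) = ((s.toList.length - 1 : Nat) : Int) by omega,
          show (0 : Int) = ((0 : Nat) : Int) by norm_num,
          funcLoopA_eq_loopN s (s.toList.length - 1) 0 (by omega),
          loopN_spec s.toList (s.toList.length - 1) 0 (by omega),
          gB_final s.toList h2]
      norm_num
    rw [hnum]
    -- B's pi[-1] is maxB
    have hpi : (kmpLoop s.toList s.toList.length 1 (List.replicate s.toList.length 0) 0).getD
        (s.toList.length - 1) 0 = maxB s.toList := by
      apply kmpLoop_spec s.toList (s.toList.length - 1) 1 _ _ (by omega) (by omega) (by omega)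
          (by simp)
      · intro j hj
        have hj0 : j = 0 := by omega
        subst hj0
        rw [maxB_take_one s.toList (by omega)]
        simp [List.getD_eq_getElem?_getD]
      · rw [maxB_take_one s.toList (by omega)]
    rw [hpi]
    have e3 : (PySem.Str.slice s (some ((maxB s.toList : Nat) : Int)) none).toList
        = s.toList.drop (maxB s.toList) := by
      simp only [PySem.Str.toList_slice, PySem.Chars.slice_eq_listSlice,
        PySem.List.slice_from_natCast]
    rw [e3]
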